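-- pv_equiv track=rewrite | github.com/sbiales/multiconer | predict/predict_base_test.py | clean_prediction
-- ===== SOURCE A (Python) =====
-- def clean_prediction(labels, word_ids):
--     new_labels = []
--     current_word = None
--     for i, word_id in enumerate(word_ids):
--         if word_id != current_word:
--             # Start of a new word! Keep the prediction
--             if word_id is not None:
--               # Check if we skipped a word and fill in with O
--               if current_word is not None and word_id - current_word > 1:
--                 diff = word_id - current_word - 1
--                 new_labels.extend(['O']*diff)
--               # Add the new prediction label
--               new_labels.append(labels[i])
--             current_word = word_id
--     return new_labels
-- ===== SOURCE B (Python) =====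
-- def clean_prediction(labels, word_ids):
--     # Pass 1: compress (word_id, label) pairs to run starts. zip truncation beyond
--     # len(labels) is harmless on valid inputs: any non-None run start there would
--     # make A raise IndexError (excluded by Pre_), and None/repeated tails emit nothing.
--     starts = []
--     for wid, lab in zip(word_ids, labels):
--         if not starts or wid != starts[-1][0]:
--             starts.append((wid, lab))
--     if not starts:
--         return []
--     # Pass 2: first run, then each adjacent pair of runs contributes its gap fill + label.
--     out = [starts[0][1]] if starts[0][0] is not None else []
--     for (pwid, _), (wid, lab) in zip(starts, starts[1:]):
--         if wid is not None:
--             fill = ['O'] * (wid - pwid - 1) if pwid is not None and wid - pwid > 1 else []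
--             out += fill + [lab]
--     return out
-- ===== Notes on version B (the rewrite author's own statement) =====
-- stated objective: alternative
-- what changed: Replaces A's single stateful loop over enumerate(word_ids) by a two-pass decomposition: pass 1 zips word_ids with labels and compresses the pairs to their run starts, pass 2 emits the output from the first run plus each adjacent pair of runs (gap fill + label), with no running current_word state.
import Mathlib
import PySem

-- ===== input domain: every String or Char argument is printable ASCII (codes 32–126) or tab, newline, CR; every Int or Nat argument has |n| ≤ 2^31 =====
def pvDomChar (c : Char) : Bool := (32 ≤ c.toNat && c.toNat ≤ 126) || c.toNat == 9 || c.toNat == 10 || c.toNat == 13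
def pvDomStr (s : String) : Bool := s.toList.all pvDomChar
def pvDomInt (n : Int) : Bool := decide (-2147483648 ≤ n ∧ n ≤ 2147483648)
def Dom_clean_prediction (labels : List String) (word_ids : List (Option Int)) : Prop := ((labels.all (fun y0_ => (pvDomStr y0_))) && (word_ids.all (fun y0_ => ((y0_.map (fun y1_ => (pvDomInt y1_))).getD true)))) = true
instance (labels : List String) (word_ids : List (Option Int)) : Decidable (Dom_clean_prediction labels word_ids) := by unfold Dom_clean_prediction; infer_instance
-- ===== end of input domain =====

-- B is an alternative decomposition: pass 1 compresses (word_id, label) pairs (via zip)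
-- to their run starts, pass 2 emits the output from adjacent pairs of runs; same cost.

-- ===== PORT A =====
-- one iteration of A's for-loop: state = (new_labels, current_word), item = (i, word_id)
def stepA (labels : List String) (st : List String × Option Int) (p : Int × Option Int) :
    List String × Option Int :=
  if p.2 ≠ st.2 then
    match p.2 with
    | some w =>
        ((match st.2 with
          | some c =>
              if w - c > 1 then st.1 ++ List.replicate (w - c - 1).toNat "O" else st.1
          | none => st.1) ++ [(PySem.List.pyGet? labels p.1).getD ""], p.2)
    | none => (st.1, p.2)
  else st

def clean_prediction (labels : List String) (word_ids : List (Option Int)) : List String :=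
  ((PySem.List.enumerate word_ids 0).foldl (stepA labels) ([], none)).1

-- ===== PORT B =====
-- pass 1 of B: append p iff starts is empty or p's word id differs from the last run's
def runStep (st : List (Option Int × String)) (p : Option Int × String) :
    List (Option Int × String) :=
  match st.getLast? with
  | none => [p]
  | some q => if p.1 ≠ q.1 then st ++ [p] else st

-- B's gap fill: ['O'] * (wid - pwid - 1) if pwid is not None and wid - pwid > 1 else []
def fillB (pwid : Option Int) (wid : Int) : List String :=
  match pwid with
  | some c => if wid - c > 1 then List.replicate (wid - c - 1).toNat "O" else []
  | none => []

-- B's contribution of one run (word id c.1, label c.2) after a run with word id pwid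
def seg1 (pwid : Option Int) (c : Option Int × String) : List String :=
  match c.1 with
  | some w => fillB pwid w ++ [c.2]
  | none => []

def clean_prediction_alt (labels : List String) (word_ids : List (Option Int)) : List String :=
  let starts := (word_ids.zip labels).foldl runStep []
  match starts with
  | [] => []
  | f :: t =>
      (match f.1 with | some _ => [f.2] | none => []) ++
      ((f :: t).zip t).flatMap (fun pc => seg1 pc.1.1 pc.2)

-- ===== PRECONDITION & SPEC =====
-- Pre_ excludes exactly the inputs where A raises IndexError: a run start with a
-- non-None word id at a position i with no label labels[i].
def Pre_clean_prediction (labels : List String) (word_ids : List (Option Int)) : Prop :=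
  ∀ i : Nat, i < word_ids.length → word_ids[i]! ≠ none →
    (i = 0 ∨ word_ids[i]! ≠ word_ids[i-1]!) → i < labels.length
instance (labels : List String) (word_ids : List (Option Int)) : Decidable (Pre_clean_prediction labels word_ids) := by unfold Pre_clean_prediction; infer_instance

def pvWitness_clean_prediction : List String × List (Option Int) :=
  (["B-X", "I-X", "B-Y"], [some 0, some 0, some 3])

def Spec_clean_prediction (labels : List String) (word_ids : List (Option Int)) (out : List String) : Prop := out = clean_prediction_alt labels word_ids
instance (labels : List String) (word_ids : List (Option Int)) (out : List String) : Decidable (Spec_clean_prediction labels word_ids out) := by unfold Spec_clean_prediction; infer_instance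

-- ===== CLAIM (what is proved, stated in full; the proofs are below) =====
def Claim_equal_clean_prediction : Prop := ∀ (labels : List String) (word_ids : List (Option Int)), Dom_clean_prediction labels word_ids → Pre_clean_prediction labels word_ids → Spec_clean_prediction labels word_ids (clean_prediction labels word_ids)

-- ===== LEMMAS AND PROOFS =====

-- the (word_id, label) pairs A's loop reads: label i is labels[i] via pyGet? (default "")
def pairsA (labels : List String) : Int → List (Option Int) → List (Option Int × String)
  | _, [] => []
  | k, w :: t => (w, (PySem.List.pyGet? labels k).getD "") :: pairsA labels (k + 1) t

-- common reference semantics: one pass over the pairs with the running current_word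
def goSpec : Option Int → List (Option Int × String) → List String
  | _, [] => []
  | prev, p :: t =>
    if p.1 = prev then goSpec prev t
    else match p.1 with
      | some v => fillB prev v ++ p.2 :: goSpec (some v) t
      | none => goSpec none t

-- run compression (what B's pass 1 computes after the first element)
def comp : Option Int → List (Option Int × String) → List (Option Int × String)
  | _, [] => []
  | prev, p :: t => if p.1 = prev then comp prev t else p :: comp p.1 t

-- emission threading the previous run's word id (what B's pass 2 computes)
def go2 : Option Int → List (Option Int × String) → List String
  | _, [] => []
  | prev, c :: t => seg1 prev c ++ go2 c.1 t

-- the running current_word after a list of pairs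
def lastWidP : Option Int → List (Option Int × String) → Option Int
  | prev, [] => prev
  | _, p :: t => lastWidP p.1 t

-- a tail on which goSpec emits nothing: each word id is None or repeats its predecessor
def TrivTail : Option Int → List (Option Int × String) → Prop
  | _, [] => True
  | prev, p :: t => (p.1 = none ∨ p.1 = prev) ∧ TrivTail p.1 t

lemma foldA (labels : List String) :
    ∀ (ws : List (Option Int)) (k : Int) (st : List String × Option Int),
      (((PySem.List.enumerate ws k).foldl (stepA labels) st)).1
        = st.1 ++ goSpec st.2 (pairsA labels k ws) := by
  intro ws
  induction ws with
  | nil => intro k st; simp [PySem.List.enumerate_nil, pairsA, goSpec]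
  | cons w t ih =>
      intro k st
      rw [PySem.List.enumerate_cons, List.foldl_cons]
      by_cases h : w = st.2
      · have e : stepA labels st (k, w) = st := by simp [stepA, h]
        rw [e, ih, pairsA]
        simp [goSpec, h]
      · cases w with
        | none =>
            have e : stepA labels st (k, none) = (st.1, none) := by
              simp [stepA, h]
            rw [e, ih, pairsA]
            simp only [goSpec]
            rw [if_neg h]
        | some v =>
            have e : stepA labels st (k, some v)
                = (st.1 ++ (fillB st.2 v ++ [(PySem.List.pyGet? labels k).getD ""]), some v) := by
              cases hc : st.2 with
              | none => simp [stepA, hc, fillB]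
              | some c =>
                  have hvc : v ≠ c := fun e => h (by rw [hc, e])
                  simp [stepA, hc, fillB, hvc]
                  split_ifs <;> simp
            rw [e, ih, pairsA]
            simp only [goSpec]
            rw [if_neg h]
            simp

lemma foldRun :
    ∀ (xs acc : List (Option Int × String)) (q : Option Int × String),
      acc.getLast? = some q → xs.foldl runStep acc = acc ++ comp q.1 xs := by
  intro xs
  induction xs with
  | nil => intro acc q _; simp [comp]
  | cons p t ih =>
      intro acc q hq
      rw [List.foldl_cons]
      by_cases h : p.1 = q.1
      · have e : runStep acc p = acc := by simp [runStep, hq, h]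
        rw [e, ih acc q hq, comp, if_pos h]
      · have e : runStep acc p = acc ++ [p] := by simp [runStep, hq, h]
        rw [e, ih (acc ++ [p]) p (by simp), comp, if_neg h, List.append_assoc]
        rfl

lemma zipflat :
    ∀ (t : List (Option Int × String)) (f : Option Int × String),
      ((f :: t).zip t).flatMap (fun pc => seg1 pc.1.1 pc.2) = go2 f.1 t := by
  intro t
  induction t with
  | nil => intro f; simp [go2]
  | cons c t' ih =>
      intro f
      rw [List.zip_cons_cons, List.flatMap_cons, ih c]
      rfl

lemma go2_comp :
    ∀ (xs : List (Option Int × String)) (prev : Option Int),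
      go2 prev (comp prev xs) = goSpec prev xs := by
  intro xs
  induction xs with
  | nil => intro prev; simp [comp, go2, goSpec]
  | cons p t ih =>
      intro prev
      by_cases h : p.1 = prev
      · rw [comp, if_pos h, ih, goSpec, if_pos h]
      · rw [comp, if_neg h, go2, ih, goSpec, if_neg h]
        cases hp : p.1 with
        | none => simp [seg1, hp]
        | some v => simp [seg1, hp]

lemma altEq (labels : List String) (word_ids : List (Option Int)) :
    clean_prediction_alt labels word_ids = goSpec none (word_ids.zip labels) := by
  unfold clean_prediction_alt
  cases hz : word_ids.zip labels with
  | nil => simp [goSpec]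
  | cons p t =>
      rw [List.foldl_cons]
      have e0 : runStep [] p = [p] := by simp [runStep]
      rw [e0, foldRun t [p] p (by simp)]
      simp only [List.singleton_append]
      rw [zipflat, go2_comp]
      cases hp : p.1 with
      | none => simp [goSpec, hp]
      | some v => simp [goSpec, hp, fillB]

lemma goSpec_append :
    ∀ (xs ys : List (Option Int × String)) (prev : Option Int),
      goSpec prev (xs ++ ys) = goSpec prev xs ++ goSpec (lastWidP prev xs) ys := by
  intro xs
  induction xs with
  | nil => intro ys prev; simp [goSpec, lastWidP]
  | cons p t ih =>
      intro ys prev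
      rw [List.cons_append]
      by_cases h : p.1 = prev
      · rw [goSpec, if_pos h, goSpec, if_pos h, ih, lastWidP, h]
      · cases hp : p.1 with
        | none =>
            rw [goSpec, if_neg h, goSpec, if_neg h, lastWidP]
            simp only [hp]
            rw [ih]
        | some v =>
            rw [goSpec, if_neg h, goSpec, if_neg h, lastWidP]
            simp only [hp]
            rw [ih]
            simp

lemma goSpec_triv :
    ∀ (xs : List (Option Int × String)) (prev : Option Int),
      TrivTail prev xs → goSpec prev xs = [] := by
  intro xs
  induction xs with
  | nil => intro prev _; rfl
  | cons p t ih =>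
      intro prev h
      obtain ⟨h1, h2⟩ := h
      by_cases hp : p.1 = prev
      · rw [goSpec, if_pos hp]
        exact ih prev (hp ▸ h2)
      · have hn : p.1 = none := h1.resolve_right hp
        rw [goSpec, if_neg hp]
        simp only [hn]
        exact ih none (hn ▸ h2)

lemma pairsA_zip (labels : List String) :
    ∀ (ws : List (Option Int)) (k : Nat), k + ws.length ≤ labels.length →
      pairsA labels (k : Int) ws = ws.zip (labels.drop k) := by
  intro ws
  induction ws with
  | nil => intro k _; rfl
  | cons w t ih =>
      intro k hk
      have hklt : k < labels.length := by simp at hk; omega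
      rw [pairsA, PySem.List.pyGet?_natCast]
      rw [List.getElem?_eq_getElem hklt]
      rw [List.drop_eq_getElem_cons hklt, List.zip_cons_cons]
      have : (k : Int) + 1 = ((k + 1 : Nat) : Int) := by push_cast; ring
      rw [this, ih (k + 1) (by simp at hk ⊢; omega)]
      rfl

lemma pairsA_append (labels : List String) :
    ∀ (xs ys : List (Option Int)) (k : Int),
      pairsA labels k (xs ++ ys) = pairsA labels k xs ++ pairsA labels (k + xs.length) ys := by
  intro xs
  induction xs with
  | nil => intro ys k; simp [pairsA]
  | cons x t ih =>
      intro ys k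
      have harg : k + 1 + (t.length : Int) = k + ((x :: t).length : Int) := by
        push_cast [List.length_cons]; ring
      rw [List.cons_append, pairsA, pairsA, ih, harg, List.cons_append]

lemma lastWidP_eq :
    ∀ (ps : List (Option Int × String)) (prev : Option Int),
      lastWidP prev ps = ((ps.getLast?).map Prod.fst).getD prev := by
  intro ps
  induction ps with
  | nil => intro prev; rfl
  | cons p t ih =>
      intro prev
      cases t with
      | nil => rfl
      | cons q r =>
          have hs : (q :: r).getLast?.isSome := by
            rw [List.getLast?_isSome]; simp
          obtain ⟨a, ha⟩ := Option.isSome_iff_exists.mp hs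
          rw [lastWidP, ih, List.getLast?_cons_cons, ha]
          simp

lemma zip_truncate {α β : Type} (xs : List α) (ys : List β) :
    xs.zip ys = (xs.take ys.length).zip ys := by
  induction xs generalizing ys with
  | nil => simp
  | cons x t ih =>
      cases ys with
      | nil => simp
      | cons y u => simp [List.zip_cons_cons, ih u]

lemma trivAux (labels : List String) (word_ids : List (Option Int))
    (hpre : Pre_clean_prediction labels word_ids) :
    ∀ (d j : Nat) (prev : Option Int), word_ids.length - j = d → labels.length ≤ j →
      (j = 0 ∨ prev = word_ids[j-1]!) →
      TrivTail prev (pairsA labels (j : Int) (word_ids.drop j)) := by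
  intro d
  induction d with
  | zero =>
      intro j prev hd _ _
      rw [List.drop_eq_nil_of_le (by omega), pairsA]
      exact trivial
  | succ d ih =>
      intro j prev hd hlen hprev
      have hj : j < word_ids.length := by omega
      rw [List.drop_eq_getElem_cons hj, pairsA]
      refine ⟨?_, ?_⟩
      · by_cases hn : word_ids[j]! = none
        · left; rw [← getElem!_pos word_ids j hj]; exact hn
        · right
          have hns : ¬ (j = 0 ∨ word_ids[j]! ≠ word_ids[j-1]!) :=
            fun hr => absurd (hpre j hj hn hr) (by omega)
          push Not at hns
          obtain ⟨hj0, heq⟩ := hns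
          rcases hprev with h0 | hpv
          · exact absurd h0 hj0
          · rw [← getElem!_pos word_ids j hj, heq, hpv]
      · have hcast : ((j : Int) + 1) = ((j + 1 : Nat) : Int) := by push_cast; ring
        rw [hcast]
        exact ih (j + 1) word_ids[j] (by omega) (by omega)
          (Or.inr (by simp [getElem!_pos word_ids j hj]))

lemma mainEq (labels : List String) (word_ids : List (Option Int))
    (hpre : Pre_clean_prediction labels word_ids) :
    goSpec none (pairsA labels 0 word_ids) = goSpec none (word_ids.zip labels) := by
  by_cases hm : word_ids.length ≤ labels.length
  · have h := pairsA_zip labels word_ids 0 (by omega)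
    simp only [Nat.cast_zero, List.drop_zero] at h
    rw [h]
  · -- labels is the shorter list: split word_ids at n = labels.length
    have hlt : labels.length < word_ids.length := by omega
    have htl : (word_ids.take labels.length).length = labels.length := by
      simp [Nat.min_eq_left (le_of_lt hlt)]
    have hzt : word_ids.zip labels = (word_ids.take labels.length).zip labels :=
      zip_truncate word_ids labels
    have hpz := pairsA_zip labels (word_ids.take labels.length) 0 (by omega)
    simp only [Nat.cast_zero, List.drop_zero] at hpz
    conv_lhs => rw [← List.take_append_drop labels.length word_ids]
    rw [pairsA_append, htl, goSpec_append, hpz, hzt]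
    have hcast : ((0 : Int) + (labels.length : Nat)) = ((labels.length : Nat) : Int) := by
      ring
    rw [hcast]
    have htriv : goSpec (lastWidP none ((word_ids.take labels.length).zip labels))
        (pairsA labels (labels.length : Int) (word_ids.drop labels.length)) = [] := by
      apply goSpec_triv
      rcases Nat.eq_zero_or_pos labels.length with h0 | hpos
      · have hz : (word_ids.take labels.length).zip labels = [] := by
          rw [h0]; simp
        rw [hz]
        exact trivAux labels word_ids hpre (word_ids.length - labels.length)
          labels.length none (by omega) (by omega) (Or.inl h0)
      · have hzl : ((word_ids.take labels.length).zip labels).length = labels.length := by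
          simp [htl]
        have hprev : lastWidP none ((word_ids.take labels.length).zip labels)
            = word_ids[labels.length - 1] := by
          rw [lastWidP_eq, List.getLast?_eq_getElem?, hzl,
            List.getElem?_eq_getElem (show labels.length - 1
              < ((word_ids.take labels.length).zip labels).length by rw [hzl]; omega)]
          simp only [Option.map_some, Option.getD_some]
          rw [List.getElem_zip, List.getElem_take]
        rw [hprev]
        exact trivAux labels word_ids hpre (word_ids.length - labels.length)
          labels.length _ (by omega) (by omega)
          (Or.inr (by rw [getElem!_pos word_ids (labels.length - 1) (by omega)]))
    rw [htriv, List.append_nil]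

-- ===== VERDICT (by name: the statement is the Claim_ definition above) =====
theorem clean_prediction_spec : Claim_equal_clean_prediction := by
  intro labels word_ids _ hpre
  unfold Spec_clean_prediction
  rw [altEq]
  have h0 := foldA labels word_ids 0 ([], none)
  unfold clean_prediction
  rw [h0, List.nil_append]
  exact mainEq labels word_ids hpre
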